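-- pv_equiv track=rewrite | github.com/marysiuniq/advent_of_code_2020 | 20/untitled2.py | find_matching_edges_reversed
-- ===== SOURCE A (Python) =====
-- def find_matching_edges_reversed(in_dictionary, dict_rev):
--     pairs = []
--     for key, value in sorted(in_dictionary.items()):
--         for key1, value1 in sorted(dict_rev.items()):
--             if key1 > key:
--                 for edge in value:
--                     if key != key1 and edge in value1:
--                         pairs += [key, value.index(edge), key1, value1.index(edge)]
--         #del in_dictionary[key]
--     return pairs
-- ===== SOURCE B (Python) =====
-- def find_matching_edges_reversed(in_dictionary, dict_rev):
--     # Alternative strategy: one hash index edge -> list of (key1, first index of edge in value1)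
--     # replaces A's per-tile rescan of dict_rev; per-tile matches are then sorted into A's emission order.
--     index = {}
--     for key1, value1 in dict_rev.items():
--         for edge in dict.fromkeys(value1):
--             index.setdefault(edge, []).append((key1, value1.index(edge)))
--     pairs = []
--     for key, value in sorted(in_dictionary.items()):
--         matches = []
--         for pos, edge in enumerate(value):
--             for key1, pos1 in index.get(edge, []):
--                 if key1 > key:
--                     matches.append((key1, pos, value.index(edge), pos1))
--         matches.sort(key=lambda t: (t[0], t[1]))
--         for key1, _pos, first, pos1 in matches:
--             pairs += [key, first, key1, pos1]
--     return pairs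
-- ===== Notes on version B (the rewrite author's own statement) =====
-- stated objective: alternative
-- what changed: Instead of re-sorting dict_rev and scanning every tile's whole edge list (with repeated list.index calls) inside the per-tile loop, B builds one hash index edge -> [(key1, first position)] over dict_rev, looks each edge up directly, and sorts the per-tile matches by (key1, position) to reproduce A's emission order.
import Mathlib
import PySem

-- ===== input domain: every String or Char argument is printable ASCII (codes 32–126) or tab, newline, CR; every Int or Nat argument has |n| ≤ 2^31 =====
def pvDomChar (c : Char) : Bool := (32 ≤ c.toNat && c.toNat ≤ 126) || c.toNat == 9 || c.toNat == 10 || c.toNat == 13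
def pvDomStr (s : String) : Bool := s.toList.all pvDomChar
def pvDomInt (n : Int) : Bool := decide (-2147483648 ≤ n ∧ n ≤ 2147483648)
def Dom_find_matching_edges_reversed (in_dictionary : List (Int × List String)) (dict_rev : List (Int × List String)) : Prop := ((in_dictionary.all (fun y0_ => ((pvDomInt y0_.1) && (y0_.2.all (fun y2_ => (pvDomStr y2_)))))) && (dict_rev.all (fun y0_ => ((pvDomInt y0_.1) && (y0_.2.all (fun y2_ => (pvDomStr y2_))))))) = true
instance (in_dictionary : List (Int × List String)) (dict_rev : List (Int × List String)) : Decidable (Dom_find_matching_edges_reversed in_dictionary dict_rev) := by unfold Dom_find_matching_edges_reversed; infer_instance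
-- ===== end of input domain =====

-- ===== PORT A =====
-- value.index(edge) (Python, only reached when edge ∈ value): exact via PySem.List.index?
def pvIdx (v : List String) (e : String) : Int := ((PySem.List.index? v e).getD 0 : Nat)

-- B replaces A's per-tile scan of dict_rev by a hash index over dict_rev's edges, sorting per-tile matches into A's emission order; objective: alternative.
-- Both ports read their dict arguments through PySem.Dict.ofList (the Python functions receive dicts, so duplicate keys in the
-- association list collapse, last value wins); Python's sorted(d.items()) compares (key, value) tuples, and since dict keys are
-- unique this is exactly sorting by the key, which is how it is ported.
def find_matching_edges_reversed (in_dictionary : List (Int × List String)) (dict_rev : List (Int × List String)) : List Int :=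
  (PySem.List.sorted (PySem.Dict.ofList in_dictionary).items (fun kv => kv.1)).foldl (fun pairs kv =>
    (PySem.List.sorted (PySem.Dict.ofList dict_rev).items (fun kv1 => kv1.1)).foldl (fun pairs kv1 =>
      if kv1.1 > kv.1 then
        kv.2.foldl (fun pairs edge =>
          if kv.1 ≠ kv1.1 ∧ edge ∈ kv1.2 then
            pairs ++ [kv.1, pvIdx kv.2 edge, kv1.1, pvIdx kv1.2 edge]
          else pairs) pairs
      else pairs) pairs) []

-- ===== PORT B =====
-- index.setdefault(edge, []).append(t) is Dict.modify edge [] (· ++ [t]); dict.fromkeys(value1) is PySem.List.dedup.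
def pvBuildIndex (revItems : List (Int × List String)) : PySem.Dict String (List (Int × Int)) :=
  revItems.foldl (fun d r =>
    (PySem.List.dedup r.2).foldl (fun d edge =>
      d.modify edge [] (· ++ [(r.1, pvIdx r.2 edge)])) d) PySem.Dict.empty

def find_matching_edges_reversed_alt (in_dictionary : List (Int × List String)) (dict_rev : List (Int × List String)) : List Int :=
  let index := pvBuildIndex (PySem.Dict.ofList dict_rev).items
  (PySem.List.sorted (PySem.Dict.ofList in_dictionary).items (fun kv => kv.1)).foldl (fun pairs kv =>
    let ms :=
      (PySem.List.enumerate kv.2).foldl (fun m pe =>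
        (index.getD pe.2 []).foldl (fun m kp =>
          if kp.1 > kv.1 then
            m ++ [(kp.1, pe.1, pvIdx kv.2 pe.2, kp.2)]
          else m) m) ([] : List (Int × Int × Int × Int))
    (PySem.List.sorted2 ms (fun t => t.1) (fun t => t.2.1)).foldl (fun pairs t =>
      pairs ++ [kv.1, t.2.2.1, t.1, t.2.2.2]) pairs) []

-- ===== PRECONDITION & SPEC =====
def Spec_find_matching_edges_reversed (in_dictionary : List (Int × List String)) (dict_rev : List (Int × List String)) (out : List Int) : Prop := out = find_matching_edges_reversed_alt in_dictionary dict_rev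
instance (in_dictionary : List (Int × List String)) (dict_rev : List (Int × List String)) (out : List Int) : Decidable (Spec_find_matching_edges_reversed in_dictionary dict_rev out) := by unfold Spec_find_matching_edges_reversed; infer_instance

-- ===== CLAIM (what is proved, stated in full; the proofs are below) =====
def Claim_equal_find_matching_edges_reversed : Prop := ∀ (in_dictionary : List (Int × List String)) (dict_rev : List (Int × List String)), Dom_find_matching_edges_reversed in_dictionary dict_rev → Spec_find_matching_edges_reversed in_dictionary dict_rev (find_matching_edges_reversed in_dictionary dict_rev)

-- ===== LEMMAS AND PROOFS =====

-- the match-tuple type and the Boolean "before" relation sorted2 uses for keys (t.1, t.2.1)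
abbrev pvT : Type := Int × Int × Int × Int
def pvSB (a b : pvT) : Bool := decide (a.1 < b.1) || !decide (b.1 < a.1) && decide (a.2.1 < b.2.1)

theorem pvSB_asymm (a b : pvT) (h : pvSB a b = true) : pvSB b a = false := by
  unfold pvSB at *; simp at *; omega

theorem pvSB_trans (a b c : pvT) (h1 : pvSB a b = true) (h2 : pvSB b c = true) : pvSB a c = true := by
  unfold pvSB at *; simp at *; omega

theorem pv_insertBy_perm (x : pvT) (l : List pvT) :
    (PySem.List.insertBy pvSB x l).Perm (x :: l) := by
  induction l with
  | nil => simp [PySem.List.insertBy]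
  | cons y ys ih =>
    simp only [PySem.List.insertBy]
    split
    · exact List.Perm.refl _
    · exact (ih.cons y).trans (List.Perm.swap x y ys)

theorem pv_insertBy_pairwise (x : pvT) (l : List pvT)
    (hl : l.Pairwise (fun a b => pvSB b a = false)) :
    (PySem.List.insertBy pvSB x l).Pairwise (fun a b => pvSB b a = false) := by
  induction l with
  | nil => simp [PySem.List.insertBy]
  | cons y ys ih =>
    rcases List.pairwise_cons.mp hl with ⟨hy, hys⟩
    simp only [PySem.List.insertBy]
    split
    · rename_i hxy
      refine List.pairwise_cons.mpr ⟨?_, hl⟩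
      intro z hz
      rcases List.mem_cons.mp hz with rfl | hz
      · exact pvSB_asymm _ _ hxy
      · by_contra hc
        simp only [Bool.not_eq_false] at hc
        have := pvSB_trans _ _ _ hc hxy
        rw [hy z hz] at this
        exact Bool.false_ne_true this
    · rename_i hxy
      refine List.pairwise_cons.mpr ⟨?_, ih hys⟩
      intro z hz
      have hmem := (pv_insertBy_perm x ys).mem_iff.mp hz
      rcases List.mem_cons.mp hmem with rfl | hz'
      · simpa using hxy
      · exact hy z hz' 

theorem pv_foldl_insertBy_perm (xs acc : List pvT) :
    (xs.foldl (fun acc x => PySem.List.insertBy pvSB x acc) acc).Perm (acc ++ xs) := by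
  induction xs generalizing acc with
  | nil => simp
  | cons x xs ih =>
    simp only [List.foldl_cons]
    refine (ih _).trans ?_
    have h1 : (PySem.List.insertBy pvSB x acc).Perm (x :: acc) := pv_insertBy_perm x acc
    exact (h1.append_right xs).trans (List.perm_middle).symm

theorem pv_foldl_insertBy_pairwise (xs acc : List pvT)
    (h : acc.Pairwise (fun a b => pvSB b a = false)) :
    (xs.foldl (fun acc x => PySem.List.insertBy pvSB x acc) acc).Pairwise (fun a b => pvSB b a = false) := by
  induction xs generalizing acc with
  | nil => exact h
  | cons x xs ih => exact ih _ (pv_insertBy_pairwise x acc h)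

-- uniqueness of the sorted arrangement: a weakly-sorted permutation of a strictly-sorted list equals it
theorem pv_sorted_unique (ys : List pvT) : ∀ zs : List pvT, zs.Perm ys →
    ys.Pairwise (fun a b => pvSB a b = true) →
    zs.Pairwise (fun a b => pvSB b a = false) → zs = ys := by
  induction ys with
  | nil => intro zs hp _ _; exact hp.eq_nil
  | cons y ys ih =>
    intro zs hp hys hzs
    cases zs with
    | nil => exact absurd hp.symm.eq_nil (by simp)
    | cons z zs' =>
      rcases List.pairwise_cons.mp hys with ⟨hy, hys'⟩
      rcases List.pairwise_cons.mp hzs with ⟨hz, hzs'⟩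
      have hzy : z = y := by
        by_contra hne
        have hzmem : z ∈ y :: ys := hp.mem_iff.mp (by simp)
        have hz_in_ys : z ∈ ys := by
          rcases List.mem_cons.mp hzmem with h | h
          · exact absurd h hne
          · exact h
        have hymem : y ∈ z :: zs' := hp.mem_iff.mpr (by simp)
        have hy_in_zs' : y ∈ zs' := by
          rcases List.mem_cons.mp hymem with h | h
          · exact absurd h.symm hne
          · exact h
        have h1 : pvSB y z = true := hy z hz_in_ys
        have h2 : pvSB y z = false := hz y hy_in_zs'
        rw [h1] at h2; exact absurd h2 (by simp)
      subst hzy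
      have := ih zs' hp.cons_inv hys' hzs'
      rw [this]

theorem pv_sorted2_eq (xs ys : List pvT) (hperm : ys.Perm xs)
    (hys : ys.Pairwise (fun a b => pvSB a b = true)) :
    PySem.List.sorted2 xs (fun t => t.1) (fun t => t.2.1) = ys := by
  have hdef : PySem.List.sorted2 xs (fun t => t.1) (fun t => t.2.1) =
      xs.foldl (fun acc x => PySem.List.insertBy pvSB x acc) [] := rfl
  rw [hdef]
  refine pv_sorted_unique ys _ ?_ hys (pv_foldl_insertBy_pairwise xs [] (by simp))
  exact ((pv_foldl_insertBy_perm xs []).trans (by simp)).trans hperm.symm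


-- ----- shared loop-normalisation helpers -----

theorem pv_foldl_if_append {A B : Type} (l : List A) (p : A → Prop) [DecidablePred p] (g : A → List B) (acc : List B) :
    l.foldl (fun acc x => if p x then acc ++ g x else acc) acc
      = acc ++ l.flatMap (fun x => if p x then g x else []) := by
  have h : (fun (acc : List B) x => if p x then acc ++ g x else acc)
      = fun acc x => acc ++ (if p x then g x else []) := by
    funext acc x; split <;> simp
  rw [h, PySem.List.foldl_append_eq_flatMap]

def pvS (d : List (Int × List String)) : List (Int × List String) :=
  PySem.List.sorted (PySem.Dict.ofList d).items (fun kv => kv.1)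

def pvABody (key : Int) (value : List String) (Rl : List (Int × List String)) : List Int :=
  Rl.flatMap (fun kv1 => if kv1.1 > key then
    value.flatMap (fun edge => if key ≠ kv1.1 ∧ edge ∈ kv1.2 then
      [key, pvIdx value edge, kv1.1, pvIdx kv1.2 edge] else []) else [])

theorem pvA_eq (ind rev : List (Int × List String)) :
    find_matching_edges_reversed ind rev
      = (pvS ind).flatMap (fun kv => pvABody kv.1 kv.2 (pvS rev)) := by
  have houter :
      (pvS ind).foldl (fun pairs kv =>
        (pvS rev).foldl (fun pairs kv1 =>
          if kv1.1 > kv.1 then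
            kv.2.foldl (fun pairs edge =>
              if kv.1 ≠ kv1.1 ∧ edge ∈ kv1.2 then
                pairs ++ [kv.1, pvIdx kv.2 edge, kv1.1, pvIdx kv1.2 edge]
              else pairs) pairs
          else pairs) pairs) []
      = [] ++ (pvS ind).flatMap (fun kv => pvABody kv.1 kv.2 (pvS rev)) := by
    have hF : (fun (pairs : List Int) (kv : Int × List String) =>
        (pvS rev).foldl (fun pairs kv1 =>
          if kv1.1 > kv.1 then
            kv.2.foldl (fun pairs edge =>
              if kv.1 ≠ kv1.1 ∧ edge ∈ kv1.2 then
                pairs ++ [kv.1, pvIdx kv.2 edge, kv1.1, pvIdx kv1.2 edge]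
              else pairs) pairs
          else pairs) pairs)
        = fun pairs kv => pairs ++ pvABody kv.1 kv.2 (pvS rev) := by
      funext pairs kv
      have hmid : (fun (pairs : List Int) (kv1 : Int × List String) =>
          if kv1.1 > kv.1 then
            kv.2.foldl (fun pairs edge =>
              if kv.1 ≠ kv1.1 ∧ edge ∈ kv1.2 then
                pairs ++ [kv.1, pvIdx kv.2 edge, kv1.1, pvIdx kv1.2 edge]
              else pairs) pairs
          else pairs)
          = fun pairs kv1 => if kv1.1 > kv.1 then
              pairs ++ kv.2.flatMap (fun edge => if kv.1 ≠ kv1.1 ∧ edge ∈ kv1.2 then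
                [kv.1, pvIdx kv.2 edge, kv1.1, pvIdx kv1.2 edge] else []) else pairs := by
        funext pairs kv1
        rw [pv_foldl_if_append kv.2 (fun edge => kv.1 ≠ kv1.1 ∧ edge ∈ kv1.2)]
      rw [hmid, pv_foldl_if_append (pvS rev) (fun kv1 => kv1.1 > kv.1)]
      rfl
    rw [hF, PySem.List.foldl_append_eq_flatMap]
  exact houter.trans (List.nil_append _)

def pvMs (key : Int) (value : List String) (idx : PySem.Dict String (List (Int × Int))) : List pvT :=
  (PySem.List.enumerate value).flatMap (fun pe =>
    (idx.getD pe.2 []).flatMap (fun kp =>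
      if kp.1 > key then [(kp.1, pe.1, pvIdx value pe.2, kp.2)] else []))

theorem pvB_eq (ind rev : List (Int × List String)) :
    find_matching_edges_reversed_alt ind rev
      = (pvS ind).flatMap (fun kv =>
          (PySem.List.sorted2 (pvMs kv.1 kv.2 (pvBuildIndex (PySem.Dict.ofList rev).items))
            (fun t => t.1) (fun t => t.2.1)).flatMap (fun t => [kv.1, t.2.2.1, t.1, t.2.2.2])) := by
  have houter :
      (pvS ind).foldl (fun pairs kv =>
        (PySem.List.sorted2
          ((PySem.List.enumerate kv.2).foldl (fun m pe =>
            ((pvBuildIndex (PySem.Dict.ofList rev).items).getD pe.2 []).foldl (fun m kp =>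
              if kp.1 > kv.1 then m ++ [(kp.1, pe.1, pvIdx kv.2 pe.2, kp.2)] else m) m)
            ([] : List (Int × Int × Int × Int)))
          (fun t => t.1) (fun t => t.2.1)).foldl (fun pairs t =>
            pairs ++ [kv.1, t.2.2.1, t.1, t.2.2.2]) pairs) []
      = [] ++ (pvS ind).flatMap (fun kv =>
          (PySem.List.sorted2 (pvMs kv.1 kv.2 (pvBuildIndex (PySem.Dict.ofList rev).items))
            (fun t => t.1) (fun t => t.2.1)).flatMap (fun t => [kv.1, t.2.2.1, t.1, t.2.2.2])) := by
    have hms : ∀ (key : Int) (value : List String),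
        (PySem.List.enumerate value).foldl (fun m pe =>
          ((pvBuildIndex (PySem.Dict.ofList rev).items).getD pe.2 []).foldl (fun m kp =>
            if kp.1 > key then m ++ [(kp.1, pe.1, pvIdx value pe.2, kp.2)] else m) m)
          ([] : List (Int × Int × Int × Int))
        = pvMs key value (pvBuildIndex (PySem.Dict.ofList rev).items) := by
      intro key value
      have hstep : (fun (m : List pvT) (pe : Int × String) =>
          ((pvBuildIndex (PySem.Dict.ofList rev).items).getD pe.2 []).foldl (fun m kp =>
            if kp.1 > key then m ++ [(kp.1, pe.1, pvIdx value pe.2, kp.2)] else m) m)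
          = fun m pe => m ++ ((pvBuildIndex (PySem.Dict.ofList rev).items).getD pe.2 []).flatMap
              (fun kp => if kp.1 > key then [(kp.1, pe.1, pvIdx value pe.2, kp.2)] else []) := by
        funext m pe
        exact pv_foldl_if_append ((pvBuildIndex (PySem.Dict.ofList rev).items).getD pe.2 [])
          (fun kp : Int × Int => kp.1 > key)
          (fun kp => [(kp.1, pe.1, pvIdx value pe.2, kp.2)]) m
      rw [hstep, PySem.List.foldl_append_eq_flatMap]
      rfl
    have hF : (fun (pairs : List Int) (kv : Int × List String) =>
        (PySem.List.sorted2
          ((PySem.List.enumerate kv.2).foldl (fun m pe =>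
            ((pvBuildIndex (PySem.Dict.ofList rev).items).getD pe.2 []).foldl (fun m kp =>
              if kp.1 > kv.1 then m ++ [(kp.1, pe.1, pvIdx kv.2 pe.2, kp.2)] else m) m)
            ([] : List (Int × Int × Int × Int)))
          (fun t => t.1) (fun t => t.2.1)).foldl (fun pairs t =>
            pairs ++ [kv.1, t.2.2.1, t.1, t.2.2.2]) pairs)
        = fun pairs kv => pairs ++
            (PySem.List.sorted2 (pvMs kv.1 kv.2 (pvBuildIndex (PySem.Dict.ofList rev).items))
              (fun t => t.1) (fun t => t.2.1)).flatMap (fun t => [kv.1, t.2.2.1, t.1, t.2.2.2]) := by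
      funext pairs kv
      rw [hms kv.1 kv.2, PySem.List.foldl_append_eq_flatMap]
    rw [hF, PySem.List.foldl_append_eq_flatMap]
  exact houter.trans (List.nil_append _)

-- ----- the index dictionary, characterised -----

theorem pv_filter_beq (ds : List String) (e : String) (h : ds.Nodup) :
    ds.filter (fun x => x == e) = if e ∈ ds then [e] else [] := by
  induction ds with
  | nil => simp
  | cons d ds ih =>
    rcases List.nodup_cons.mp h with ⟨hd, hnd⟩
    by_cases hde : d = e
    · subst hde
      have hnil : ds.filter (fun x => x == d) = [] := by
        rw [List.filter_eq_nil_iff]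
        intro x hx
        by_cases hxd : x = d
        · exact absurd (hxd ▸ hx) hd
        · simp [hxd]
      simp [hnil]
    · have hbeq : ((d == e) = false) := by simpa using hde
      have hne : e ≠ d := fun h => hde h.symm
      simp [hbeq, ih hnd, hne]

theorem pv_getD_inner (ds : List String) (f : String → Int × Int)
    (d : PySem.Dict String (List (Int × Int))) (e : String) (h : ds.Nodup) :
    (ds.foldl (fun d x => d.modify x [] (· ++ [f x])) d).getD e []
      = d.getD e [] ++ (if e ∈ ds then [f e] else []) := by
  have h0 : ds.foldl (fun d x => d.modify x [] (· ++ [f x])) d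
      = (ds.map (fun x => (x, f x))).foldl (fun d p => d.modify p.1 [] (· ++ [p.2])) d := by
    rw [List.foldl_map]
  rw [h0, PySem.Dict.getD_foldl_modify_append, List.filter_map]
  have h1 : ((fun p => p.1 == e) ∘ fun x => (x, f x)) = fun x => x == e := rfl
  rw [h1, pv_filter_beq ds e h]
  by_cases he : e ∈ ds <;> simp [he]

theorem pv_getD_build_aux (I : List (Int × List String)) (e : String) :
    ∀ d : PySem.Dict String (List (Int × Int)),
    (I.foldl (fun d r => (PySem.List.dedup r.2).foldl
        (fun d edge => d.modify edge [] (· ++ [(r.1, pvIdx r.2 edge)])) d) d).getD e []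
      = d.getD e [] ++ I.flatMap (fun r => if e ∈ r.2 then [(r.1, pvIdx r.2 e)] else []) := by
  induction I with
  | nil => intro d; simp
  | cons r I ih =>
    intro d
    rw [List.foldl_cons, ih,
        pv_getD_inner (PySem.List.dedup r.2) (fun x => (r.1, pvIdx r.2 x)) d e (PySem.List.nodup_dedup r.2)]
    simp only [PySem.List.mem_dedup, List.flatMap_cons, List.append_assoc]

theorem pv_getD_build (I : List (Int × List String)) (e : String) :
    (pvBuildIndex I).getD e []
      = I.flatMap (fun r => if e ∈ r.2 then [(r.1, pvIdx r.2 e)] else []) := by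
  unfold pvBuildIndex
  rw [pv_getD_build_aux I e PySem.Dict.empty, PySem.Dict.getD_empty, List.nil_append]

-- ----- the match list, as a flatMap over the raw items -----

theorem pvMs_eq (key : Int) (value : List String) (I : List (Int × List String)) :
    pvMs key value (pvBuildIndex I)
      = (PySem.List.enumerate value).flatMap (fun pe =>
          I.flatMap (fun r => if r.1 > key ∧ pe.2 ∈ r.2 then
            [(r.1, pe.1, pvIdx value pe.2, pvIdx r.2 pe.2)] else [])) := by
  unfold pvMs
  congr 1
  funext pe
  rw [pv_getD_build I pe.2, List.flatMap_assoc]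
  congr 1
  funext r
  by_cases hm : pe.2 ∈ r.2 <;> by_cases hk : r.1 > key <;> simp [hm, hk]

-- ----- permutation: swapping the two traversal orders -----

theorem pv_flatMap_append_perm {A C : Type} (ys : List A) (g h : A → List C) :
    (ys.flatMap (fun y => g y ++ h y)).Perm (ys.flatMap g ++ ys.flatMap h) := by
  induction ys with
  | nil => simp
  | cons y ys ih =>
    simp only [List.flatMap_cons]
    have h1 : ((g y ++ h y) ++ ys.flatMap (fun y => g y ++ h y)).Perm
        ((g y ++ h y) ++ (ys.flatMap g ++ ys.flatMap h)) := ih.append_left _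
    have h2 : ((g y ++ h y) ++ (ys.flatMap g ++ ys.flatMap h)).Perm
        ((g y ++ ys.flatMap g) ++ (h y ++ ys.flatMap h)) := by
      have hmid : (h y ++ (ys.flatMap g ++ ys.flatMap h)).Perm
          (ys.flatMap g ++ (h y ++ ys.flatMap h)) := by
        have := (List.perm_append_comm (l₁ := h y) (l₂ := ys.flatMap g)).append_right (ys.flatMap h)
        simpa [List.append_assoc] using this
      have := hmid.append_left (g y)
      simpa [List.append_assoc] using this
    exact h1.trans h2

theorem pv_flatMap_swap {A B C : Type} (xs : List A) (ys : List B) (f : A → B → List C) :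
    (xs.flatMap fun x => ys.flatMap (f x)).Perm (ys.flatMap fun y => xs.flatMap (fun x => f x y)) := by
  induction xs with
  | nil => simp
  | cons x xs ih =>
    simp only [List.flatMap_cons]
    refine List.Perm.trans ?_ (pv_flatMap_append_perm ys (f x) (fun y => xs.flatMap (fun x => f x y))).symm
    exact ih.append_left _

def pvTupleA (key : Int) (value : List String) (Rl : List (Int × List String)) : List pvT :=
  Rl.flatMap (fun r => if r.1 > key then
    (PySem.List.enumerate value).flatMap (fun pe => if pe.2 ∈ r.2 then
      [(r.1, pe.1, pvIdx value pe.2, pvIdx r.2 pe.2)] else []) else [])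

theorem pvTupleA_form (key : Int) (value : List String) (Rl : List (Int × List String)) :
    pvTupleA key value Rl
      = Rl.flatMap (fun r => (PySem.List.enumerate value).flatMap (fun pe =>
          if r.1 > key ∧ pe.2 ∈ r.2 then
            [(r.1, pe.1, pvIdx value pe.2, pvIdx r.2 pe.2)] else [])) := by
  unfold pvTupleA
  congr 1
  funext r
  by_cases hk : r.1 > key
  · simp only [hk, if_true]
    congr 1
    funext pe
    by_cases hm : pe.2 ∈ r.2 <;> simp [hm]
  · simp [hk]

theorem pv_perm (key : Int) (value : List String) (rev : List (Int × List String)) :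
    (pvTupleA key value (pvS rev)).Perm
      (pvMs key value (pvBuildIndex (PySem.Dict.ofList rev).items)) := by
  rw [pvMs_eq, pvTupleA_form]
  refine List.Perm.trans ?_ (pv_flatMap_swap (PySem.Dict.ofList rev).items (PySem.List.enumerate value)
    (fun r pe => if r.1 > key ∧ pe.2 ∈ r.2 then [(r.1, pe.1, pvIdx value pe.2, pvIdx r.2 pe.2)] else []))
  exact (PySem.List.sorted_perm (PySem.Dict.ofList rev).items (fun kv1 => kv1.1) false).flatMap
    (fun a _ => List.Perm.refl _)

-- ----- strict sortedness of the nested-loop order -----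

theorem pvS_pairwise_lt (d : List (Int × List String)) :
    (pvS d).Pairwise (fun a b => a.1 < b.1) := by
  have hle := PySem.List.sorted_pairwise (PySem.Dict.ofList d).items (fun kv => kv.1)
  have hnd : ((PySem.Dict.ofList d).items.map (fun kv => kv.1)).Nodup :=
    PySem.Dict.nodup_keys_ofList d
  have hperm : ((pvS d).map (fun kv => kv.1)).Perm ((PySem.Dict.ofList d).items.map (fun kv => kv.1)) :=
    (PySem.List.sorted_perm (PySem.Dict.ofList d).items (fun kv => kv.1) false).map _
  have hnd2 : ((pvS d).map (fun kv => kv.1)).Nodup := hperm.nodup_iff.mpr hnd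
  have hne : (pvS d).Pairwise (fun a b => a.1 ≠ b.1) := List.pairwise_map.mp hnd2
  exact (hle.and hne).imp (fun h => lt_of_le_of_ne h.1 h.2)

theorem pv_mem_tupleA_block (key : Int) (value : List String) (r : Int × List String) (t : pvT)
    (ht : t ∈ (if r.1 > key then
      (PySem.List.enumerate value).flatMap (fun pe => if pe.2 ∈ r.2 then
        [(r.1, pe.1, pvIdx value pe.2, pvIdx r.2 pe.2)] else []) else ([] : List pvT))) :
    t.1 = r.1 := by
  split at ht
  · rcases List.mem_flatMap.mp ht with ⟨pe, _, hpe⟩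
    split at hpe
    · rcases List.mem_singleton.mp hpe with rfl; rfl
    · exact absurd hpe (List.not_mem_nil)
  · exact absurd ht (List.not_mem_nil)

theorem pv_pairwise_tupleA (key : Int) (value : List String) (rev : List (Int × List String)) :
    (pvTupleA key value (pvS rev)).Pairwise (fun a b => pvSB a b = true) := by
  unfold pvTupleA
  rw [List.flatMap_def, List.pairwise_flatten]
  constructor
  · intro l hl
    rcases List.mem_map.mp hl with ⟨r, _, rfl⟩
    split
    · rw [List.flatMap_def, List.pairwise_flatten]
      constructor
      · intro l' hl'
        rcases List.mem_map.mp hl' with ⟨pe, _, rfl⟩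
        split <;> simp
      · have hE := PySem.List.pairwise_lt_enumerate value 0
        rw [List.pairwise_map]
        refine hE.imp_of_mem ?_
        intro pe pe' _ _ hlt t ht t' ht'
        have h1 : t = (r.1, pe.1, pvIdx value pe.2, pvIdx r.2 pe.2) := by
          split at ht
          · exact List.mem_singleton.mp ht
          · exact absurd ht (List.not_mem_nil)
        have h2 : t' = (r.1, pe'.1, pvIdx value pe'.2, pvIdx r.2 pe'.2) := by
          split at ht'
          · exact List.mem_singleton.mp ht'
          · exact absurd ht' (List.not_mem_nil)
        subst h1; subst h2
        unfold pvSB; simp; omega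
    · simp
  · have hR := pvS_pairwise_lt rev
    rw [List.pairwise_map]
    refine hR.imp_of_mem ?_
    intro r r' _ _ hlt t ht t' ht'
    have h1 := pv_mem_tupleA_block key value r t ht
    have h2 := pv_mem_tupleA_block key value r' t' ht'
    unfold pvSB; simp; omega

-- ----- the per-tile core: B's sorted match list is exactly A's emission order -----

theorem pv_core (key : Int) (value : List String) (rev : List (Int × List String)) :
    PySem.List.sorted2 (pvMs key value (pvBuildIndex (PySem.Dict.ofList rev).items))
      (fun t => t.1) (fun t => t.2.1)
      = pvTupleA key value (pvS rev) :=
  pv_sorted2_eq _ _ (pv_perm key value rev) (pv_pairwise_tupleA key value rev)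

-- ----- A's body equals the flattened quadruples of the tuple list -----

theorem pv_enum_snd {B : Type} (xs : List String) (s : Int) (f : String → List B) :
    (PySem.List.enumerate xs s).flatMap (fun pe => f pe.2) = xs.flatMap f := by
  induction xs generalizing s with
  | nil => simp [PySem.List.enumerate]
  | cons x xs ih => rw [PySem.List.enumerate_cons, List.flatMap_cons, ih, List.flatMap_cons]

theorem pvABody_eq (key : Int) (value : List String) (Rl : List (Int × List String)) :
    pvABody key value Rl
      = (pvTupleA key value Rl).flatMap (fun t => [key, t.2.2.1, t.1, t.2.2.2]) := by
  unfold pvABody pvTupleA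
  rw [List.flatMap_assoc]
  congr 1
  funext r
  by_cases hk : r.1 > key
  · simp only [hk, if_true]
    rw [List.flatMap_assoc]
    rw [show (fun pe : Int × String =>
        (if pe.2 ∈ r.2 then [((r.1 : Int), pe.1, pvIdx value pe.2, pvIdx r.2 pe.2)] else ([] : List pvT)).flatMap
          (fun t => [key, t.2.2.1, t.1, t.2.2.2]))
        = fun pe => (fun e => if key ≠ r.1 ∧ e ∈ r.2 then
            [key, pvIdx value e, r.1, pvIdx r.2 e] else []) pe.2 from ?_]
    · exact (pv_enum_snd value 0 _).symm
    · funext pe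
      have hne : key ≠ r.1 := ne_of_lt hk
      by_cases hm : pe.2 ∈ r.2 <;> simp [hm, hne]
  · simp [hk]


-- ===== VERDICT (by name: the statement is the Claim_ definition above) =====
theorem find_matching_edges_reversed_spec : Claim_equal_find_matching_edges_reversed := by
  intro ind rev _dom
  unfold Spec_find_matching_edges_reversed
  rw [pvA_eq, pvB_eq]
  congr 1
  funext kv
  rw [pv_core kv.1 kv.2 rev, pvABody_eq]
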